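-- pv_equiv track=rewrite | github.com/linacastaneda/Taller1_SumadorRestador | Sumador_Restador.py | adder_subtractor_4bits
-- ===== SOURCE A (Python) =====
-- def AND(a, b):
--     # Puerta AND: retorna 1 solo si ambos valores son 1
--     return a & b
--
-- def OR(a, b):
--     # Puerta OR: retorna 1 si al menos uno de los valores es 1
--     return a | b
--
-- def NOT(a):
--     # Puerta NOT: invierte el valor (0->1, 1->0)
--     return 1 - a
--
-- def XOR(a, b):
--     # Puerta XOR: retorna 1 si los valores son diferentes
--     # (a AND NOT b) OR (NOT a AND b)
--     return OR(AND(a, NOT(b)), AND(NOT(a), b))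
--
-- def full_adder(a, b, cin):
--     # Primer XOR entre a y b
--     s1 = XOR(a, b)
--     # Segunda XOR con el acarreo de entrada para obtener el bit de suma
--     suma = XOR(s1, cin)
--
--     # Se generan los acarreos parciales
--     c1 = AND(a, b)      # Acarreo si a y b son 1
--     c2 = AND(a, cin)    # Acarreo si a y el acarreo de entrada son 1
--     c3 = AND(b, cin)    # Acarreo si b y el acarreo de entrada son 1
--
--     # El acarreo de salida es 1 si alguno de los acarreos parciales es 1
--     cout = OR(OR(c1, c2), c3)
--
--     # Retorna el bit de suma y el acarreo de salida
--     return suma, cout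
--
-- def adder_subtractor_4bits(A, B, M):
--     # Lista para almacenar los resultados de cada bit
--     resultado = []
--     # El acarreo inicial es igual al modo (0 para suma, 1 para resta)
--     carry = M
--
--     # Procesa cada bit de los números de 4 bits
--     for i in range(4):
--         # Modifica B[i] con XOR(B[i], M) para aplicación de modo
--         # Si M=0 (suma): B[i] se mantiene igual
--         # Si M=1 (resta): B[i] se invierte (complemento a 1)
--         b_mod = XOR(B[i], M)
--         # Llama al sumador completo de 1 bit
--         s, carry = full_adder(A[i], b_mod, carry)
--         # Almacena el bit de resultado
--         resultado.append(s)
--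
--     # Retorna el resultado de 4 bits y el acarreo final
--     return resultado, carry
-- ===== SOURCE B (Python) =====
-- def adder_subtractor_4bits(A, B, M):
--     # Carry-lookahead organisation: per bit, compute generate (g = a & b) and
--     # propagate (p = a | b) signals, then obtain each carry by the lookahead
--     # recurrence c' = g | (p & c) instead of the ripple majority formula; the two
--     # agree because (a&b)|(a&c)|(b&c) == (a&b)|((a|b)&c) holds bitwise on all ints.
--     bm = [(b & (1 - M)) | ((1 - b) & M) for b in B[:4]]
--     gp = [(a & b, a | b) for a, b in zip(A[:4], bm)]
--     carries = [M]
--     for g, p in gp: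
--         carries.append(g | (p & carries[-1]))
--     resultado = []
--     for (a, b), c in zip(zip(A[:4], bm), carries):
--         s1 = (a & (1 - b)) | ((1 - a) & b)
--         resultado.append((s1 & (1 - c)) | ((1 - s1) & c))
--     return resultado, carries[4]
-- ===== Notes on version B (the rewrite author's own statement) =====
-- stated objective: alternative
-- what changed: B replaces the ripple-carry loop (per-bit full_adder with a majority carry threaded through one loop) by a carry-lookahead organisation: it computes generate/propagate signals (g = a&b, p = a|b) for all bits, derives the carries by the lookahead recurrence c' = g | (p & c) in a scan, and produces the sum bits in a separate zip pass; this is exact on all ints because (a&b)|(a&c)|(b&c) = (a&b)|((a|b)&c) holds bitwise (proved in Lean as pvMajCLA via Int.land/lor distributivity).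
import Mathlib
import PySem

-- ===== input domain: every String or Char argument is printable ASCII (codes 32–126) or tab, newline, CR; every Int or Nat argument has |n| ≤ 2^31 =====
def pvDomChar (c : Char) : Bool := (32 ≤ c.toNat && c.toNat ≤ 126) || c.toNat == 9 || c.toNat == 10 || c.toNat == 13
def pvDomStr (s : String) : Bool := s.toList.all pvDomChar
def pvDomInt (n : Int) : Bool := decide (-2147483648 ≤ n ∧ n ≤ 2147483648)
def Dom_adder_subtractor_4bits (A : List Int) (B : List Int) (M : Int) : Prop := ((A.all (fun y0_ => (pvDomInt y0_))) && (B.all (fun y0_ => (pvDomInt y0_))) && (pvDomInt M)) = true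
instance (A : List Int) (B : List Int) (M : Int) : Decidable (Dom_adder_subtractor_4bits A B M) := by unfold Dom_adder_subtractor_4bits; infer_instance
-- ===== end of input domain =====

-- B replaces the ripple-carry majority-carry loop by a carry-lookahead organisation
-- (generate/propagate signals, carry recurrence c' = g | (p & c)); exact on all ints
-- because (a&b)|(a&c)|(b&c) = (a&b)|((a|b)&c) holds bitwise.

-- ===== PORT A =====
def pyAND (a b : Int) : Int := PySem.Int.band a b
def pyOR (a b : Int) : Int := PySem.Int.bor a b
def pyNOT (a : Int) : Int := 1 - a
def pyXOR (a b : Int) : Int := pyOR (pyAND a (pyNOT b)) (pyAND (pyNOT a) b)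

def full_adder (a b cin : Int) : Int × Int :=
  let s1 := pyXOR a b
  let suma := pyXOR s1 cin
  let c1 := pyAND a b
  let c2 := pyAND a cin
  let c3 := pyAND b cin
  let cout := pyOR (pyOR c1 c2) c3
  (suma, cout)

-- A[i]/B[i]: in range for every input admitted by Pre_ (IndexError inputs are excluded there)
def adder_subtractor_4bits (A : List Int) (B : List Int) (M : Int) : List Int × Int :=
  (List.range 4).foldl
    (fun (st : List Int × Int) i =>
      let b_mod := pyXOR ((PySem.List.pyGet? B (Int.ofNat i)).getD 0) M
      let sc := full_adder ((PySem.List.pyGet? A (Int.ofNat i)).getD 0) b_mod st.2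
      (st.1 ++ [sc.1], sc.2))
    ([], M)

-- ===== PORT B =====
-- Source B's slices A[:4]/B[:4] are List.take 4 (nonnegative bound); carries[4] is
-- pyGet? (in range whenever Pre_ holds, since the scan then appends 4 carries to [M]).
def adder_subtractor_4bits_alt (A : List Int) (B : List Int) (M : Int) : List Int × Int :=
  let bm := (B.take 4).map (fun b => PySem.Int.bor (PySem.Int.band b (1 - M)) (PySem.Int.band (1 - b) M))
  let gp := ((A.take 4).zip bm).map (fun ab => (PySem.Int.band ab.1 ab.2, PySem.Int.bor ab.1 ab.2))
  let carries := gp.foldl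
    (fun cs x => cs ++ [PySem.Int.bor x.1 (PySem.Int.band x.2 ((cs.getLast?).getD 0))]) [M]
  let resultado := (((A.take 4).zip bm).zip carries).map (fun x =>
    let s1 := PySem.Int.bor (PySem.Int.band x.1.1 (1 - x.1.2)) (PySem.Int.band (1 - x.1.1) x.1.2)
    PySem.Int.bor (PySem.Int.band s1 (1 - x.2)) (PySem.Int.band (1 - s1) x.2))
  (resultado, (PySem.List.pyGet? carries 4).getD 0)

-- ===== PRECONDITION & SPEC =====
-- Pre_ excludes exactly the inputs on which A raises IndexError: a list with fewer than 4 elements.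
def Pre_adder_subtractor_4bits (A : List Int) (B : List Int) (M : Int) : Prop :=
  4 ≤ A.length ∧ 4 ≤ B.length
instance (A : List Int) (B : List Int) (M : Int) : Decidable (Pre_adder_subtractor_4bits A B M) := by
  unfold Pre_adder_subtractor_4bits; infer_instance
def pvWitness_adder_subtractor_4bits : List Int × List Int × Int := ([1, 0, 1, 0], [1, 1, 0, 0], 1)

def Spec_adder_subtractor_4bits (A : List Int) (B : List Int) (M : Int) (out : List Int × Int) : Prop := out = adder_subtractor_4bits_alt A B M
instance (A : List Int) (B : List Int) (M : Int) (out : List Int × Int) : Decidable (Spec_adder_subtractor_4bits A B M out) := by unfold Spec_adder_subtractor_4bits; infer_instance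

-- ===== CLAIM =====
def Claim_equal_adder_subtractor_4bits : Prop := ∀ (A : List Int) (B : List Int) (M : Int), Dom_adder_subtractor_4bits A B M → Pre_adder_subtractor_4bits A B M → Spec_adder_subtractor_4bits A B M (adder_subtractor_4bits A B M)

-- ===== LEMMAS AND PROOFS =====
-- Nat: the low (ldiff) and shared (and) parts of m partition it.
theorem pvLdiffAddAnd : ∀ (m : Nat), ∀ n : Nat, Nat.ldiff m n + (m &&& n) = m := by
  intro m
  induction m using Nat.binaryRec with
  | zero => intro n; simp [Nat.ldiff]
  | bit b m ih =>
    intro n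
    rw [← Nat.bit_bodd_div2 n, Nat.ldiff_bit, Nat.land_bit, Nat.bit_val, Nat.bit_val, Nat.bit_val]
    have := ih (Nat.div2 n)
    cases b <;> cases Nat.bodd n <;> simp <;> omega

theorem pvSubAnd (m n : Nat) : m - (m &&& n) = Nat.ldiff m n := by
  have := pvLdiffAddAnd m n; omega

-- PySem's Python-exact band/bor coincide with Mathlib's Int.land/Int.lor.
theorem pvBandEqLand (a b : Int) : PySem.Int.band a b = Int.land a b := by
  cases a with
  | ofNat m => cases b with
    | ofNat n => simp [PySem.Int.band, Int.land]
    | negSucc n => simp [PySem.Int.band, Int.land, Int.negSucc_eq, pvSubAnd]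
      <;> (try split_ifs) <;> (try intro h) <;> omega
  | negSucc m => cases b with
    | ofNat n => simp [PySem.Int.band, Int.land, Int.negSucc_eq, pvSubAnd]
      <;> (try split_ifs) <;> (try intro h) <;> omega
    | negSucc n => simp [PySem.Int.band, Int.land, Int.negSucc_eq] <;> (try split_ifs) <;> omega

theorem pvBorEqLor (a b : Int) : PySem.Int.bor a b = Int.lor a b := by
  cases a with
  | ofNat m => cases b with
    | ofNat n => simp [PySem.Int.bor, Int.lor]
    | negSucc n => simp [PySem.Int.bor, Int.lor, Int.negSucc_eq, pvSubAnd]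
      <;> (try split_ifs) <;> (try intro h) <;> omega
  | negSucc m => cases b with
    | ofNat n => simp [PySem.Int.bor, Int.lor, Int.negSucc_eq, pvSubAnd]
      <;> (try split_ifs) <;> (try intro h) <;> omega
    | negSucc n => simp [PySem.Int.bor, Int.lor, Int.negSucc_eq] <;> (try split_ifs) <;> omega

-- Majority carry = carry-lookahead carry, bitwise on all of Int.
theorem pvLandDistrib (a b c : Int) :
    Int.lor (Int.lor (Int.land a b) (Int.land a c)) (Int.land b c)
      = Int.lor (Int.land a b) (Int.land (Int.lor a b) c) := by
  cases a <;> cases b <;> cases c <;>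
    simp only [Int.land, Int.lor] <;>
    congr 1 <;>
    apply Nat.eq_of_testBit_eq <;>
    intro k <;>
    simp only [Nat.testBit_lor, Nat.testBit_land, Nat.testBit_ldiff] <;>
    cases h1 : Nat.testBit _ k <;> simp_all <;>
    (try cases h2 : Nat.testBit _ k) <;> simp_all

theorem pvMajCLA (a b c : Int) :
    PySem.Int.bor (PySem.Int.bor (PySem.Int.band a b) (PySem.Int.band a c)) (PySem.Int.band b c)
      = PySem.Int.bor (PySem.Int.band a b) (PySem.Int.band (PySem.Int.bor a b) c) := by
  simp only [pvBandEqLand, pvBorEqLor, pvLandDistrib]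

-- Both ports read only the first four elements, so the tails are irrelevant.
theorem pvPortAtake4 (a0 a1 a2 a3 b0 b1 b2 b3 M : Int) (A B : List Int) :
    adder_subtractor_4bits (a0::a1::a2::a3::A) (b0::b1::b2::b3::B) M
      = adder_subtractor_4bits [a0,a1,a2,a3] [b0,b1,b2,b3] M := by
  simp [adder_subtractor_4bits, List.range_succ, PySem.List.pyGet?_natCast]

theorem pvPortBtake4 (a0 a1 a2 a3 b0 b1 b2 b3 M : Int) (A B : List Int) :
    adder_subtractor_4bits_alt (a0::a1::a2::a3::A) (b0::b1::b2::b3::B) M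
      = adder_subtractor_4bits_alt [a0,a1,a2,a3] [b0,b1,b2,b3] M := by
  simp [adder_subtractor_4bits_alt, List.take]

-- ===== VERDICT =====
theorem adder_subtractor_4bits_spec : Claim_equal_adder_subtractor_4bits := by
  intro A B M _ hpre
  obtain ⟨hA, hB⟩ := hpre
  rcases A with _|⟨a0,A⟩; · simp at hA
  rcases A with _|⟨a1,A⟩; · simp at hA
  rcases A with _|⟨a2,A⟩; · simp at hA
  rcases A with _|⟨a3,A⟩; · simp at hA
  rcases B with _|⟨b0,B⟩; · simp at hB
  rcases B with _|⟨b1,B⟩; · simp at hB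
  rcases B with _|⟨b2,B⟩; · simp at hB
  rcases B with _|⟨b3,B⟩; · simp at hB
  unfold Spec_adder_subtractor_4bits
  rw [pvPortAtake4, pvPortBtake4]
  simp [adder_subtractor_4bits, adder_subtractor_4bits_alt, full_adder, pyXOR, pyAND, pyOR,
    pyNOT, List.range_succ, List.take, PySem.List.pyGet?_natCast, pvMajCLA]
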